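-- pv_equiv track=rewrite | github.com/YangForever/COP514Group | guifinal/cwgui/OFB_asc2str.py | asc2str
-- ===== SOURCE A (Python) =====
-- def asc2str(asc_num):
-- 	r_str = ''
-- 	t_str = ''
-- 	i = 0
-- 	while(i != len(asc_num)):
-- 		if asc_num[i] == '1':
-- 			t_str += asc_num[i]
-- 			t_str += asc_num[i+1]
-- 			t_str += asc_num[i+2]
-- 			i = i+3
-- 			try:
-- 				r_str += chr(int(t_str))
-- 			except:
-- 				r_str += chr(int(44))
-- 			t_str = ''
-- 		else:
-- 			t_str += asc_num[i]
-- 			t_str += asc_num[i+1]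
-- 			i = i+2
-- 			try:
-- 				r_str += chr(int(t_str))
-- 			except:
-- 				r_str += chr(int(44))
-- 			t_str = ''
-- 	return r_str
-- ===== SOURCE B (Python) =====
-- def asc2str(asc_num):
--     # two-pass: tokenize into variable-length codes, then decode each token
--     tokens = []
--     i = 0
--     n = len(asc_num)
--     while i < n:
--         k = 3 if asc_num[i] == '1' else 2
--         tokens.append(asc_num[i:i+k])
--         i += k
--     out = []
--     for tok in tokens:
--         try:
--             out.append(chr(int(tok)))
--         except Exception:
--             out.append(chr(44))
--     return ''.join(out)
-- ===== Notes on version B (the rewrite author's own statement) =====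
-- stated objective: faster
-- what changed: B separates the work into two passes - first tokenize the string into variable-length code slices, then decode each token with chr(int(.)) and a chr(44) comma fallback, joining the result once - instead of A's single walk that builds each token and the result by repeated string concatenation.
-- outside the precondition, e.g. on asc2str('9'): A raises IndexError, B returns '\t'; on asc2str('15'): A raises IndexError, B returns '\x0f'
import Mathlib
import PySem

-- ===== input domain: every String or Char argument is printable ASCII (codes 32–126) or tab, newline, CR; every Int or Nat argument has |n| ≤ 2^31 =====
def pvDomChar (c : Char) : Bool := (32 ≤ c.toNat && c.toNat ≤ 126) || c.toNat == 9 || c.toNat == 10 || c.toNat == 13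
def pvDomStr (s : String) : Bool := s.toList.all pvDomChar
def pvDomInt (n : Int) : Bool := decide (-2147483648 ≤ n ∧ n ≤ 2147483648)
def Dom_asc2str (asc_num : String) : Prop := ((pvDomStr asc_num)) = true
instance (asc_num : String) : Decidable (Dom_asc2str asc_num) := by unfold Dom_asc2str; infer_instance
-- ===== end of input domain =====

-- B decodes token by token from a pre-built token list; A interleaves tokenizing and decoding in one walk.
-- Equivalence of the return values is proved on Pre_ (the strings A tokenizes without an IndexError).

-- shared decode helper: chr(int(t)) with the bare `except` fallback chr(44), a comma.
-- Hand port of chr: exact here because every token has ≤ 3 ASCII chars, so its int value is ≤ 199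
-- (far below the surrogate range Lean's Char cannot hold).
def ascDecode (t : List Char) : Char :=
  match PySem.Int.ofChars? t with
  | some n => if 0 ≤ n ∧ n < 1114112 then Char.ofNat n.toNat else ','
  | none => ','

-- ===== PORT A =====
-- A's single walk: read s[i]; consume 3 chars if it is '1', else 2, decoding as it goes.
-- The `_ => []` arms are where Python raises IndexError (s[i+1]/s[i+2] out of range); excluded by Pre_.
def ascLoopA : List Char → List Char
  | [] => []
  | c :: rest =>
    if c = '1' then
      match rest with
      | a :: b :: rest' => ascDecode [c, a, b] :: ascLoopA rest'
      | _ => []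
    else
      match rest with
      | a :: rest' => ascDecode [c, a] :: ascLoopA rest'
      | [] => []

def asc2str (asc_num : String) : String := String.ofList (ascLoopA asc_num.toList)

-- ===== PORT B =====
-- pass 1 of Source B: the token list (s[i:i+k] slices; slicing clamps, so no raise)
def ascTokensB : List Char → List (List Char)
  | [] => []
  | c :: rest =>
    if c = '1' then (c :: rest).take 3 :: ascTokensB (rest.drop 2)
    else (c :: rest).take 2 :: ascTokensB (rest.drop 1)
termination_by l => l.length
decreasing_by all_goals simp

-- pass 2 of Source B: decode each token, join
def asc2str_alt (asc_num : String) : String :=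
  String.ofList ((ascTokensB asc_num.toList).map ascDecode)

-- ===== PRECONDITION & SPEC =====
-- Pre_: the shape condition "the string is a concatenation of complete codes" (a 3-char code
-- starting with '1', or a 2-char code starting with anything else) — membership in this regular
-- language is the natural input domain; on every other string A raises IndexError (returns
-- nothing, e.g. on "9" or "15", where the last code is truncated), so those inputs are excluded.
def tokOk : List Char → Bool
  | [] => true
  | c :: rest =>
    if c = '1' then
      match rest with
      | _ :: _ :: rest' => tokOk rest'
      | _ => false
    else
      match rest with
      | _ :: rest' => tokOk rest'
      | [] => false

def Pre_asc2str (asc_num : String) : Prop := tokOk asc_num.toList = true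
instance (asc_num : String) : Decidable (Pre_asc2str asc_num) := by unfold Pre_asc2str; infer_instance

def pvWitness_asc2str : String := "65120"

def Spec_asc2str (asc_num : String) (out : String) : Prop := out = asc2str_alt asc_num
instance (asc_num : String) (out : String) : Decidable (Spec_asc2str asc_num out) := by unfold Spec_asc2str; infer_instance

-- ===== CLAIM (what is proved, stated in full; the proofs are below) =====
def Claim_equal_asc2str : Prop := ∀ (asc_num : String), Dom_asc2str asc_num → Pre_asc2str asc_num → Spec_asc2str asc_num (asc2str asc_num)

-- ===== LEMMAS AND PROOFS =====

theorem ascLoopA_eq_tokens (l : List Char) (h : tokOk l = true) :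
    ascLoopA l = (ascTokensB l).map ascDecode := by
  induction l using ascLoopA.induct with
  | case1 => simp [ascLoopA, ascTokensB]
  | case2 a b rest' ih =>
    simp only [tokOk] at h
    simp [ascLoopA, ascTokensB, ih h]
  | case3 rest hno =>
    match rest, h with
    | [], h => simp [tokOk] at h
    | [a], h => simp [tokOk] at h
    | a :: b :: r, h => exact absurd rfl (hno a b r)
  | case4 c hc a rest' ih =>
    unfold tokOk at h
    rw [if_neg hc] at h
    unfold ascLoopA
    rw [if_neg hc]
    simp [ascTokensB, hc, ih h]
  | case5 c hc =>
    unfold tokOk at h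
    rw [if_neg hc] at h
    simp at h

-- ===== VERDICT (by name: the statement is the Claim_ definition above) =====
theorem asc2str_spec : Claim_equal_asc2str := by
  intro s _ hpre
  unfold Spec_asc2str asc2str asc2str_alt
  rw [ascLoopA_eq_tokens _ hpre]
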